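-- pv_equiv track=rewrite | github.com/KenichiNomura/A3HT | generate_analysis_powerpoint.py | presentation_rels_xml
-- ===== SOURCE A (Python) =====
-- def presentation_rels_xml(slide_count):
--     rels = ['<Relationship Id="rId1" Type="http://schemas.openxmlformats.org/officeDocument/2006/relationships/slideMaster" Target="slideMasters/slideMaster1.xml"/>']
--     for idx in range(1, slide_count + 1):
--         rels.append('<Relationship Id="rId%d" Type="http://schemas.openxmlformats.org/officeDocument/2006/relationships/slide" Target="slides/slide%d.xml"/>' % (idx + 1, idx))
--     rels.append('<Relationship Id="rId%d" Type="http://schemas.openxmlformats.org/officeDocument/2006/relationships/presProps" Target="presProps.xml"/>' % (slide_count + 2))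
--     rels.append('<Relationship Id="rId%d" Type="http://schemas.openxmlformats.org/officeDocument/2006/relationships/viewProps" Target="viewProps.xml"/>' % (slide_count + 3))
--     rels.append('<Relationship Id="rId%d" Type="http://schemas.openxmlformats.org/officeDocument/2006/relationships/tableStyles" Target="tableStyles.xml"/>' % (slide_count + 4))
--     return '<?xml version="1.0" encoding="UTF-8" standalone="yes"?><Relationships xmlns="http://schemas.openxmlformats.org/package/2006/relationships">%s</Relationships>' % ''.join(rels)
-- ===== SOURCE B (Python) =====
-- _RT = "http://schemas.openxmlformats.org/officeDocument/2006/relationships/"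
--
--
-- def presentation_rels_xml(slide_count):
--     pairs = (
--         [(_RT + "slideMaster", "slideMasters/slideMaster1.xml")]
--         + [(_RT + "slide", "slides/slide%d.xml" % i) for i in range(1, slide_count + 1)]
--         + [(_RT + "presProps", "presProps.xml"),
--            (_RT + "viewProps", "viewProps.xml"),
--            (_RT + "tableStyles", "tableStyles.xml")]
--     )
--     body = ''.join('<Relationship Id="rId%d" Type="%s" Target="%s"/>' % (i, typ, target)
--                    for i, (typ, target) in enumerate(pairs, 1))
--     return ('<?xml version="1.0" encoding="UTF-8" standalone="yes"?>'
--             '<Relationships xmlns="http://schemas.openxmlformats.org/package/2006/relationships">'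
--             '%s</Relationships>' % body)
-- ===== Notes on version B (the rewrite author's own statement) =====
-- stated objective: simpler
-- what changed: B builds one table of (Type, Target) pairs in rId order and formats all of them uniformly in a single enumerate pass, instead of A's special-cased head string, offset loop and three trailing appends with hand-computed rId offsets; Pre_ excludes negative slide counts, which lie outside the natural domain of a slide count (there the two rId numberings diverge and neither is specified).
import Mathlib
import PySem

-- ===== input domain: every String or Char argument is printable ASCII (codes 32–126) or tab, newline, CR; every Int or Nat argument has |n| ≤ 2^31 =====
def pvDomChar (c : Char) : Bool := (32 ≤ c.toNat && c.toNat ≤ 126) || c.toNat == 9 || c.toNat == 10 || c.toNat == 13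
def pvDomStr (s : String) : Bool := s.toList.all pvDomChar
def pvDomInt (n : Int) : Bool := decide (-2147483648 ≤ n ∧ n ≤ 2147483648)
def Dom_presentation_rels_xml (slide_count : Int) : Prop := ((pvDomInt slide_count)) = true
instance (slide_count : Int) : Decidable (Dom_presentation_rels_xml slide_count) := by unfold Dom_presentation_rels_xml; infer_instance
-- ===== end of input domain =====

-- B replaces A's special-cased head string + offset loop + three trailing appends by one table of
-- (Type, Target) pairs formatted uniformly in a single enumerate pass; objective: simpler.


-- ===== PORT A =====
def pvSlideRelA (idx : Int) : String :=
  "<Relationship Id=\"rId" ++ PySem.Int.toStr (idx + 1) ++ "\" Type=\"http://schemas.openxmlformats.org/officeDocument/2006/relationships/slide\" Target=\"slides/slide" ++ PySem.Int.toStr idx ++ ".xml\"/>"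

def presentation_rels_xml (slide_count : Int) : String :=
  let rels : List String := ["<Relationship Id=\"rId1\" Type=\"http://schemas.openxmlformats.org/officeDocument/2006/relationships/slideMaster\" Target=\"slideMasters/slideMaster1.xml\"/>"]
  let rels := (PySem.List.pyRange 1 (slide_count + 1) 1).foldl (fun acc idx => acc ++ [pvSlideRelA idx]) rels
  let rels := rels ++ ["<Relationship Id=\"rId" ++ PySem.Int.toStr (slide_count + 2) ++ "\" Type=\"http://schemas.openxmlformats.org/officeDocument/2006/relationships/presProps\" Target=\"presProps.xml\"/>"]
  let rels := rels ++ ["<Relationship Id=\"rId" ++ PySem.Int.toStr (slide_count + 3) ++ "\" Type=\"http://schemas.openxmlformats.org/officeDocument/2006/relationships/viewProps\" Target=\"viewProps.xml\"/>"]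
  let rels := rels ++ ["<Relationship Id=\"rId" ++ PySem.Int.toStr (slide_count + 4) ++ "\" Type=\"http://schemas.openxmlformats.org/officeDocument/2006/relationships/tableStyles\" Target=\"tableStyles.xml\"/>"]
  "<?xml version=\"1.0\" encoding=\"UTF-8\" standalone=\"yes\"?><Relationships xmlns=\"http://schemas.openxmlformats.org/package/2006/relationships\">" ++ PySem.Str.join "" rels ++ "</Relationships>"

-- ===== PORT B =====
def pvRT : String := "http://schemas.openxmlformats.org/officeDocument/2006/relationships/"

def pvPairsB (slide_count : Int) : List (String × String) :=
  [(pvRT ++ "slideMaster", "slideMasters/slideMaster1.xml")]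
  ++ (PySem.List.pyRange 1 (slide_count + 1) 1).map (fun i => (pvRT ++ "slide", "slides/slide" ++ PySem.Int.toStr i ++ ".xml"))
  ++ [(pvRT ++ "presProps", "presProps.xml"),
      (pvRT ++ "viewProps", "viewProps.xml"),
      (pvRT ++ "tableStyles", "tableStyles.xml")]

def pvFmtB (p : Int × (String × String)) : String :=
  "<Relationship Id=\"rId" ++ PySem.Int.toStr p.1 ++ "\" Type=\"" ++ p.2.1 ++ "\" Target=\"" ++ p.2.2 ++ "\"/>"

def presentation_rels_xml_alt (slide_count : Int) : String :=
  let body := PySem.Str.join "" ((PySem.List.enumerate (pvPairsB slide_count) 1).map pvFmtB)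
  "<?xml version=\"1.0\" encoding=\"UTF-8\" standalone=\"yes\"?><Relationships xmlns=\"http://schemas.openxmlformats.org/package/2006/relationships\">" ++ body ++ "</Relationships>"

-- ===== PRECONDITION & SPEC =====
-- Pre_ excludes negative slide counts, which lie outside the natural domain of the task (a count
-- of slides): there A offsets the three trailing rIds by the negative count while B numbers
-- every entry consecutively, and neither numbering is specified for such an input.
def Pre_presentation_rels_xml (slide_count : Int) : Prop := 0 ≤ slide_count
instance (slide_count : Int) : Decidable (Pre_presentation_rels_xml slide_count) := by unfold Pre_presentation_rels_xml; infer_instance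

def pvWitness_presentation_rels_xml : Int := (2)

def Spec_presentation_rels_xml (slide_count : Int) (out : String) : Prop := out = presentation_rels_xml_alt slide_count
instance (slide_count : Int) (out : String) : Decidable (Spec_presentation_rels_xml slide_count out) := by unfold Spec_presentation_rels_xml; infer_instance

-- ===== CLAIM (what is proved, stated in full; the proofs are below) =====
def Claim_equal_presentation_rels_xml : Prop := ∀ (slide_count : Int), Dom_presentation_rels_xml slide_count → Pre_presentation_rels_xml slide_count → Spec_presentation_rels_xml slide_count (presentation_rels_xml slide_count)

-- ===== LEMMAS AND PROOFS =====

-- B's uniform formatter applied to a slide pair with index i+1 is exactly A's slide string for i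
theorem pvFmt_slide (i : Int) :
    pvFmtB (i + 1, (pvRT ++ "slide", "slides/slide" ++ PySem.Int.toStr i ++ ".xml")) = pvSlideRelA i := by
  unfold pvFmtB pvSlideRelA pvRT
  rw [show ("\" Type=\"http://schemas.openxmlformats.org/officeDocument/2006/relationships/slide\" Target=\"slides/slide" : String) = "\" Type=\"" ++ "http://schemas.openxmlformats.org/officeDocument/2006/relationships/" ++ "slide" ++ "\" Target=\"" ++ "slides/slide" from rfl,
      show (".xml\"/>" : String) = ".xml" ++ "\"/>" from rfl]
  simp only [String.append_assoc]

-- enumerating the mapped slide range starting at 2 reproduces A's slide strings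
theorem pvSlides_eq (m : Nat) :
    (PySem.List.enumerate ((List.range m).map (fun (k : Nat) => (pvRT ++ "slide", "slides/slide" ++ PySem.Int.toStr (1 + (k : Int)) ++ ".xml"))) 2).map pvFmtB
    = (List.range m).map (fun (k : Nat) => pvSlideRelA (1 + (k : Int))) := by
  induction m with
  | zero => rfl
  | succ m ih =>
    rw [List.range_succ, List.map_append, PySem.List.enumerate_append, List.map_append, ih,
        List.map_append]
    congr 1
    simp only [List.map_cons, List.map_nil, PySem.List.enumerate_cons, PySem.List.enumerate_nil,
      List.length_map, List.length_range]
    rw [show ((2 : Int) + (m : Int)) = (1 + (m : Int)) + 1 from by ring]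
    rw [pvFmt_slide (1 + (m : Int))]

-- the full relationship-string lists agree for a nonnegative slide count
set_option maxRecDepth 10000 in
theorem pvFmt_master :
    pvFmtB (1, (pvRT ++ "slideMaster", "slideMasters/slideMaster1.xml")) = "<Relationship Id=\"rId1\" Type=\"http://schemas.openxmlformats.org/officeDocument/2006/relationships/slideMaster\" Target=\"slideMasters/slideMaster1.xml\"/>" := by
  unfold pvFmtB pvRT
  rw [show PySem.Int.toStr 1 = "1" from rfl,
      show ("<Relationship Id=\"rId1\" Type=\"http://schemas.openxmlformats.org/officeDocument/2006/relationships/slideMaster\" Target=\"slideMasters/slideMaster1.xml\"/>" : String) = "<Relationship Id=\"rId" ++ "1" ++ "\" Type=\"" ++ "http://schemas.openxmlformats.org/officeDocument/2006/relationships/" ++ "slideMaster" ++ "\" Target=\"" ++ "slideMasters/slideMaster1.xml" ++ "\"/>" from rfl]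
  simp only [String.append_assoc]

theorem pvFmt_presProps (j : Int) :
    pvFmtB (j, (pvRT ++ "presProps", "presProps.xml")) = "<Relationship Id=\"rId" ++ PySem.Int.toStr j ++ "\" Type=\"http://schemas.openxmlformats.org/officeDocument/2006/relationships/presProps\" Target=\"presProps.xml\"/>" := by
  unfold pvFmtB pvRT
  rw [show ("\" Type=\"http://schemas.openxmlformats.org/officeDocument/2006/relationships/presProps\" Target=\"presProps.xml\"/>" : String) = "\" Type=\"" ++ "http://schemas.openxmlformats.org/officeDocument/2006/relationships/" ++ "presProps" ++ "\" Target=\"" ++ "presProps.xml" ++ "\"/>" from rfl]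
  simp only [String.append_assoc]

theorem pvFmt_viewProps (j : Int) :
    pvFmtB (j, (pvRT ++ "viewProps", "viewProps.xml")) = "<Relationship Id=\"rId" ++ PySem.Int.toStr j ++ "\" Type=\"http://schemas.openxmlformats.org/officeDocument/2006/relationships/viewProps\" Target=\"viewProps.xml\"/>" := by
  unfold pvFmtB pvRT
  rw [show ("\" Type=\"http://schemas.openxmlformats.org/officeDocument/2006/relationships/viewProps\" Target=\"viewProps.xml\"/>" : String) = "\" Type=\"" ++ "http://schemas.openxmlformats.org/officeDocument/2006/relationships/" ++ "viewProps" ++ "\" Target=\"" ++ "viewProps.xml" ++ "\"/>" from rfl]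
  simp only [String.append_assoc]

theorem pvFmt_tableStyles (j : Int) :
    pvFmtB (j, (pvRT ++ "tableStyles", "tableStyles.xml")) = "<Relationship Id=\"rId" ++ PySem.Int.toStr j ++ "\" Type=\"http://schemas.openxmlformats.org/officeDocument/2006/relationships/tableStyles\" Target=\"tableStyles.xml\"/>" := by
  unfold pvFmtB pvRT
  rw [show ("\" Type=\"http://schemas.openxmlformats.org/officeDocument/2006/relationships/tableStyles\" Target=\"tableStyles.xml\"/>" : String) = "\" Type=\"" ++ "http://schemas.openxmlformats.org/officeDocument/2006/relationships/" ++ "tableStyles" ++ "\" Target=\"" ++ "tableStyles.xml" ++ "\"/>" from rfl]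
  simp only [String.append_assoc]

-- the full relationship-string lists agree for a nonnegative slide count
set_option maxRecDepth 10000 in
theorem pvLists_eq (n : Int) (h : 0 ≤ n) :
    (PySem.List.enumerate (pvPairsB n) 1).map pvFmtB
    = ("<Relationship Id=\"rId1\" Type=\"http://schemas.openxmlformats.org/officeDocument/2006/relationships/slideMaster\" Target=\"slideMasters/slideMaster1.xml\"/>"
        :: (PySem.List.pyRange 1 (n + 1) 1).map pvSlideRelA)
      ++ ["<Relationship Id=\"rId" ++ PySem.Int.toStr (n + 2) ++ "\" Type=\"http://schemas.openxmlformats.org/officeDocument/2006/relationships/presProps\" Target=\"presProps.xml\"/>",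
          "<Relationship Id=\"rId" ++ PySem.Int.toStr (n + 3) ++ "\" Type=\"http://schemas.openxmlformats.org/officeDocument/2006/relationships/viewProps\" Target=\"viewProps.xml\"/>",
          "<Relationship Id=\"rId" ++ PySem.Int.toStr (n + 4) ++ "\" Type=\"http://schemas.openxmlformats.org/officeDocument/2006/relationships/tableStyles\" Target=\"tableStyles.xml\"/>"] := by
  unfold pvPairsB
  rw [PySem.List.pyRange_one, show n + 1 - 1 = n from by ring]
  simp only [List.cons_append, List.nil_append, PySem.List.enumerate_cons,
    PySem.List.enumerate_append, List.length_map, List.length_range, List.map_cons,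
    List.map_append, List.map_map, PySem.List.enumerate_nil, List.map_nil]
  rw [pvFmt_master,
      show ((1 : Int) + 1) = 2 from rfl,
      show ((2 : Int) + (n.toNat : Int)) = n + 2 from by omega,
      pvFmt_presProps, pvFmt_viewProps, pvFmt_tableStyles,
      show (n + 2 + 1) = n + 3 from by ring,
      show (n + 3 + 1) = n + 4 from by ring]
  congr 1
  congr 1
  simpa [Function.comp_def] using pvSlides_eq n.toNat

-- ===== VERDICT (by name: the statement is the Claim_ definition above) =====
theorem presentation_rels_xml_spec : Claim_equal_presentation_rels_xml := by
  intro n _ hpre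
  unfold Spec_presentation_rels_xml presentation_rels_xml presentation_rels_xml_alt
  simp only [PySem.List.foldl_append_singleton_eq_map]
  rw [pvLists_eq n hpre]
  simp [List.append_assoc]
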